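-- pv_equiv track=rewrite | github.com/belimor/python-daily | 001-atlassian-megacorp.py | calculate_bonuses
-- ===== SOURCE A (Python) =====
-- def calculate_bonuses(lines_of_code):
--     n = len(lines_of_code)
--     bonuses = [1] * n # Initialize all bonuses to 1
--
--     for i in range(1,n):
--         if lines_of_code[i] > lines_of_code[i-1]:
--             bonuses[i] = bonuses[i-1] + 1
--
--     for i in range(n-2,-1,-1):
--         if lines_of_code[i] > lines_of_code[i+1]:
--             bonuses[i] = max(bonuses[i], bonuses[i+1] + 1)
--
--     return(bonuses)
-- ===== SOURCE B (Python) =====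
-- def calculate_bonuses(lines_of_code):
--     n = len(lines_of_code)
--
--     def bonus(i):
--         # length of the strictly increasing run ending at i
--         j = i
--         while j > 0 and lines_of_code[j] > lines_of_code[j - 1]:
--             j -= 1
--         # length of the strictly decreasing run starting at i
--         k = i
--         while k + 1 < n and lines_of_code[k] > lines_of_code[k + 1]:
--             k += 1
--         return max(i - j + 1, k - i + 1)
--
--     return [bonus(i) for i in range(n)]
-- ===== Notes on version B (the rewrite author's own statement) =====
-- stated objective: alternative
-- what changed: Replaces A's two in-place dynamic-programming passes over one shared bonuses array by a table-free per-index computation: for each index i a local backward scan finds the start of the strictly increasing run ending at i and a local forward scan finds the end of the strictly decreasing run starting at i, and the bonus is the max of the two run lengths.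
import Mathlib
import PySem

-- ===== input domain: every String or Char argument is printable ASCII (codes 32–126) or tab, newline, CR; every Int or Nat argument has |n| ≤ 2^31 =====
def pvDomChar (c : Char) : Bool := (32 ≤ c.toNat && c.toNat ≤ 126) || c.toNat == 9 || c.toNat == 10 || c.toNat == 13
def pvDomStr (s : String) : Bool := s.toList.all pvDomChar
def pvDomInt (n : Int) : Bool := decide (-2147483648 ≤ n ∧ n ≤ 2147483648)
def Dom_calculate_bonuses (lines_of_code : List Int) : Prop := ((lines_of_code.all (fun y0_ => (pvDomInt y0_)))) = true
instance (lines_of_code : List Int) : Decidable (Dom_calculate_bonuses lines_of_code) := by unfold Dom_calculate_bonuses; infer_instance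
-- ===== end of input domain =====

-- B replaces A's two in-place DP passes over one shared bonuses array by a table-free
-- per-index computation: for each i, a local backward scan to the start of the increasing
-- run ending at i and a local forward scan to the end of the decreasing run starting at i,
-- bonus = max of the two run lengths; alternative decomposition, O(n^2) worst case.

-- ===== PORT A =====
-- All indexing is at provably in-range nonnegative indices, so pyGetD _ _ 0 and
-- List.set i.toNat are exact for Python's lines_of_code[i] / bonuses[i] = v.
def calculate_bonuses (lines_of_code : List Int) : List Int :=
  let n : Int := (lines_of_code.length : Int)
  let bonuses : List Int := List.replicate lines_of_code.length 1
  let bonuses := (PySem.List.pyRange 1 n 1).foldl (fun b i =>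
    if PySem.List.pyGetD lines_of_code i 0 > PySem.List.pyGetD lines_of_code (i - 1) 0 then
      b.set i.toNat (PySem.List.pyGetD b (i - 1) 0 + 1)
    else b) bonuses
  let bonuses := (PySem.List.pyRange (n - 2) (-1) (-1)).foldl (fun b i =>
    if PySem.List.pyGetD lines_of_code i 0 > PySem.List.pyGetD lines_of_code (i + 1) 0 then
      b.set i.toNat (max (PySem.List.pyGetD b i 0) (PySem.List.pyGetD b (i + 1) 0 + 1))
    else b) bonuses
  bonuses

-- ===== PORT B =====
-- 'while j > 0 and lines_of_code[j] > lines_of_code[j-1]: j -= 1' — j stays in [0, i],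
-- so getD with default 0 is exact for the in-range Python indexing.
def pvBackJ (loc : List Int) : Nat → Nat
  | 0 => 0
  | j + 1 => if loc.getD (j + 1) 0 > loc.getD j 0 then pvBackJ loc j else j + 1

-- 'while k + 1 < n and lines_of_code[k] > lines_of_code[k+1]: k += 1' — k stays < n.
def pvFwdK (loc : List Int) (k : Nat) : Nat :=
  if _h : k + 1 < loc.length then
    (if loc.getD k 0 > loc.getD (k + 1) 0 then pvFwdK loc (k + 1) else k)
  else k
termination_by loc.length - k
decreasing_by omega

def calculate_bonuses_alt (lines_of_code : List Int) : List Int :=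
  (List.range lines_of_code.length).map (fun i =>
    let j := pvBackJ lines_of_code i
    let k := pvFwdK lines_of_code i
    max ((i : Int) - (j : Int) + 1) ((k : Int) - (i : Int) + 1))

-- ===== PRECONDITION & SPEC =====
def Spec_calculate_bonuses (lines_of_code : List Int) (out : List Int) : Prop := out = calculate_bonuses_alt lines_of_code
instance (lines_of_code : List Int) (out : List Int) : Decidable (Spec_calculate_bonuses lines_of_code out) := by unfold Spec_calculate_bonuses; infer_instance

-- ===== CLAIM (what is proved, stated in full; the proofs are below) =====
def Claim_equal_calculate_bonuses : Prop := ∀ (lines_of_code : List Int), Dom_calculate_bonuses lines_of_code → Spec_calculate_bonuses lines_of_code (calculate_bonuses lines_of_code)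

-- ===== LEMMAS AND PROOFS =====

-- Index-wise specification: length of the strictly increasing run ending at i …
def pvUp (loc : List Int) : Nat → Int
  | 0 => 1
  | i + 1 => if i + 1 < loc.length ∧ loc.getD (i + 1) 0 > loc.getD i 0 then pvUp loc i + 1 else 1

-- … and of the strictly decreasing run starting at i.
def pvDown (loc : List Int) (i : Nat) : Int :=
  if h : i + 1 < loc.length then
    (if loc.getD i 0 > loc.getD (i + 1) 0 then pvDown loc (i + 1) + 1 else 1)
  else 1
termination_by loc.length - i
decreasing_by omega

def pvFin (loc : List Int) (i : Nat) : Int := max (pvUp loc i) (pvDown loc i)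

lemma one_le_pvUp (loc : List Int) (i : Nat) : 1 ≤ pvUp loc i := by
  induction i with
  | zero => simp [pvUp]
  | succ i ih => simp only [pvUp]; split <;> omega

lemma one_le_pvDown (loc : List Int) (i : Nat) : 1 ≤ pvDown loc i := by
  fun_induction pvDown loc i with
  | case1 i h hc ih => omega
  | case2 i h hc => omega
  | case3 i h => omega

-- B's backward scan computes pvUp
lemma backJ_up (loc : List Int) : ∀ (i : Nat), i < loc.length →
    (i : Int) - (pvBackJ loc i : Int) + 1 = pvUp loc i := by
  intro i
  induction i with
  | zero => intro _; simp [pvBackJ, pvUp]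
  | succ i ih =>
    intro hi
    by_cases hc : loc.getD (i + 1) 0 > loc.getD i 0
    · rw [show pvBackJ loc (i + 1) = pvBackJ loc i by simp only [pvBackJ]; rw [if_pos hc],
        show pvUp loc (i + 1) = pvUp loc i + 1 by simp only [pvUp]; rw [if_pos ⟨hi, hc⟩],
        ← ih (by omega)]
      push_cast; ring
    · rw [show pvBackJ loc (i + 1) = i + 1 by simp only [pvBackJ]; rw [if_neg hc],
        show pvUp loc (i + 1) = 1 by simp only [pvUp]; rw [if_neg (fun h => hc h.2)]]
      push_cast; ring

-- B's forward scan computes pvDown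
lemma fwdK_down (loc : List Int) (k : Nat) :
    (pvFwdK loc k : Int) - (k : Int) + 1 = pvDown loc k := by
  fun_induction pvFwdK loc k with
  | case1 k h hc ih =>
    rw [show pvDown loc k = pvDown loc (k + 1) + 1 by
        rw [pvDown.eq_def, dif_pos h, if_pos hc], ← ih]
    push_cast; ring
  | case2 k h hc =>
    rw [show pvDown loc k = 1 by rw [pvDown.eq_def, dif_pos h, if_neg hc]]
    ring
  | case3 k h =>
    rw [show pvDown loc k = 1 by rw [pvDown.eq_def, dif_neg h]]
    ring

lemma alt_eq (loc : List Int) :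
    calculate_bonuses_alt loc = (List.range loc.length).map (pvFin loc) := by
  unfold calculate_bonuses_alt
  refine List.map_congr_left fun i hi => ?_
  have hi' := List.mem_range.mp hi
  simp only [pvFin]
  rw [backJ_up loc i hi', fwdK_down loc i]

-- A's forward pass
lemma fwd_inv (loc : List Int) (k : Nat) (hk : k ≤ loc.length) :
    (PySem.List.pyRange 1 (k : Int) 1).foldl (fun b i =>
      if PySem.List.pyGetD loc i 0 > PySem.List.pyGetD loc (i - 1) 0 then
        b.set i.toNat (PySem.List.pyGetD b (i - 1) 0 + 1)
      else b) (List.replicate loc.length 1)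
    = (List.range loc.length).map (fun i => if i < k then pvUp loc i else 1) := by
  induction k with
  | zero =>
    rw [show ((0 : Nat) : Int) = 0 by norm_num, PySem.List.pyRange_one_eq_nil (by norm_num)]
    simp [List.foldl_nil, List.map_const']
  | succ k ih =>
    have hk' : k ≤ loc.length := by omega
    have hklen : k < loc.length := by omega
    rcases Nat.eq_zero_or_pos k with h0 | hpos
    · subst h0
      rw [show (((0 + 1 : Nat)) : Int) = 1 by norm_num, PySem.List.pyRange_one_eq_nil (by norm_num)]
      simp only [List.foldl_nil]
      refine List.ext_getElem (by simp) ?_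
      intro i h1 h2
      simp only [List.getElem_replicate, List.getElem_map, List.getElem_range]
      by_cases hi0 : i = 0
      · subst hi0; simp [pvUp]
      · rw [if_neg (by omega)]
    · have hk1 : k - 1 + 1 = k := by omega
      rw [show ((k + 1 : Nat) : Int) = (k : Int) + 1 by push_cast; ring,
        PySem.List.pyRange_one_succ_right (by exact_mod_cast hpos), List.foldl_append,
        ih hk', List.foldl_cons, List.foldl_nil]
      have hcast : (k : Int) - 1 = ((k - 1 : Nat) : Int) := by omega
      rw [hcast]
      simp only [PySem.List.pyGetD_natCast, Int.toNat_natCast]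
      have hSgetD : ((List.range loc.length).map (fun i => if i < k then pvUp loc i else 1)).getD (k - 1) 0
          = pvUp loc (k - 1) := by
        rw [List.getD_eq_getElem _ _ (by simpa using (by omega : k - 1 < loc.length))]
        simp only [List.getElem_map, List.getElem_range]
        rw [if_pos (by omega)]
      by_cases hc : loc.getD k 0 > loc.getD (k - 1) 0
      · rw [if_pos hc, hSgetD]
        have hup : pvUp loc k = pvUp loc (k - 1) + 1 := by
          conv_lhs => rw [← hk1]
          simp only [pvUp]
          rw [if_pos ⟨by omega, by rw [hk1]; exact hc⟩]
        refine List.ext_getElem (by simp) ?_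
        intro i h1 h2
        have hilen : i < loc.length := by simpa using h2
        rw [List.getElem_set]
        simp only [List.getElem_map, List.getElem_range]
        by_cases hik : k = i
        · subst hik
          rw [if_pos rfl, if_pos (by omega), hup]
        · rw [if_neg hik]
          by_cases hlt : i < k
          · rw [if_pos hlt, if_pos (by omega)]
          · rw [if_neg hlt, if_neg (by omega)]
      · rw [if_neg hc]
        refine List.map_congr_left fun i hi => ?_
        have hup1 : pvUp loc k = 1 := by
          conv_lhs => rw [← hk1]
          simp only [pvUp]
          rw [if_neg (by rw [hk1]; exact fun h => hc h.2)]
        by_cases hik : i = k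
        · subst hik
          simp [hup1]
        · by_cases hlt : i < k
          · rw [if_pos hlt, if_pos (by omega)]
          · rw [if_neg hlt, if_neg (by omega)]

-- A's backward pass: one step
lemma bwd_step (loc : List Int) (k : Nat) (hk : k + 1 < loc.length) :
    (fun (b : List Int) (i : Int) =>
      if PySem.List.pyGetD loc i 0 > PySem.List.pyGetD loc (i + 1) 0 then
        b.set i.toNat (max (PySem.List.pyGetD b i 0) (PySem.List.pyGetD b (i + 1) 0 + 1))
      else b)
      ((List.range loc.length).map (fun i => if i < k + 1 then pvUp loc i else pvFin loc i)) (k : Int)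
    = (List.range loc.length).map (fun i => if i < k then pvUp loc i else pvFin loc i) := by
  have hklen : k < loc.length := by omega
  simp only []
  rw [show (k : Int) + 1 = ((k + 1 : Nat) : Int) by push_cast; ring]
  simp only [PySem.List.pyGetD_natCast, Int.toNat_natCast]
  have hget_k : ((List.range loc.length).map (fun i => if i < k + 1 then pvUp loc i else pvFin loc i)).getD k 0
      = pvUp loc k := by
    rw [List.getD_eq_getElem _ _ (by simpa using hklen)]
    simp only [List.getElem_map, List.getElem_range]
    rw [if_pos (by omega)]
  have hget_k1 : ((List.range loc.length).map (fun i => if i < k + 1 then pvUp loc i else pvFin loc i)).getD (k + 1) 0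
      = pvFin loc (k + 1) := by
    rw [List.getD_eq_getElem _ _ (by simpa using hk)]
    simp only [List.getElem_map, List.getElem_range]
    rw [if_neg (by omega)]
  have hdp := one_le_pvDown loc (k + 1)
  by_cases hc : loc.getD k 0 > loc.getD (k + 1) 0
  · rw [if_pos hc, hget_k, hget_k1]
    have hupk1 : pvUp loc (k + 1) = 1 := by
      simp only [pvUp]
      rw [if_neg (fun h => by omega)]
    have hdk : pvDown loc k = pvDown loc (k + 1) + 1 := by
      conv_lhs => rw [pvDown.eq_def]
      rw [dif_pos hk, if_pos hc]
    have key : max (pvUp loc k) (pvFin loc (k + 1) + 1) = pvFin loc k := by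
      simp only [pvFin, hupk1, hdk]
      omega
    refine List.ext_getElem (by simp) ?_
    intro i h1 h2
    rw [List.getElem_set]
    simp only [List.getElem_map, List.getElem_range]
    by_cases hik : k = i
    · subst hik
      rw [if_pos rfl, if_neg (by omega), key]
    · rw [if_neg hik]
      by_cases hlt : i < k
      · rw [if_pos (by omega), if_pos hlt]
      · rw [if_neg (by omega), if_neg hlt]
  · rw [if_neg hc]
    refine List.map_congr_left fun i hi => ?_
    have hdk1 : pvDown loc k = 1 := by
      rw [pvDown.eq_def, dif_pos hk, if_neg hc]
    have hfk : pvFin loc k = pvUp loc k := by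
      have := one_le_pvUp loc k
      simp only [pvFin, hdk1]
      omega
    by_cases hik : i = k
    · subst hik
      rw [if_pos (by omega), if_neg (by omega), hfk]
    · by_cases hlt : i < k
      · rw [if_pos (by omega), if_pos hlt]
      · rw [if_neg (by omega), if_neg hlt]

lemma bwd_inv (loc : List Int) (m : Nat) (hm : m + 1 < loc.length) :
    (PySem.List.pyRange (m : Int) (-1) (-1)).foldl (fun b i =>
      if PySem.List.pyGetD loc i 0 > PySem.List.pyGetD loc (i + 1) 0 then
        b.set i.toNat (max (PySem.List.pyGetD b i 0) (PySem.List.pyGetD b (i + 1) 0 + 1))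
      else b)
      ((List.range loc.length).map (fun i => if i < m + 1 then pvUp loc i else pvFin loc i))
    = (List.range loc.length).map (pvFin loc) := by
  induction m with
  | zero =>
    have hb := bwd_step loc 0 (by omega)
    rw [show ((0 : Nat) : Int) = 0 by norm_num, PySem.List.pyRange_neg_one_cons (by norm_num),
      PySem.List.pyRange_neg_one_eq_nil (by norm_num), List.foldl_cons, List.foldl_nil]
    simpa using hb
  | succ m ih =>
    have hb := bwd_step loc (m + 1) (by omega)
    rw [show ((m + 1 : Nat) : Int) = (m : Int) + 1 by push_cast; ring] at hb ⊢
    beta_reduce at hb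
    rw [PySem.List.pyRange_neg_one_cons (by omega), show (m : Int) + 1 - 1 = (m : Int) by ring,
      List.foldl_cons, hb]
    exact ih (by omega)

lemma pvFin_last (loc : List Int) (i : Nat) (hi : i + 1 = loc.length) :
    pvFin loc i = pvUp loc i := by
  have hd : pvDown loc i = 1 := by rw [pvDown.eq_def, dif_neg (by omega)]
  have := one_le_pvUp loc i
  simp only [pvFin, hd]
  omega

lemma a_eq (loc : List Int) : calculate_bonuses loc = (List.range loc.length).map (pvFin loc) := by
  by_cases h0 : loc.length = 0
  · rw [List.length_eq_zero_iff.mp h0]; rfl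
  simp only [calculate_bonuses]
  rw [fwd_inv loc loc.length le_rfl]
  by_cases h1 : loc.length = 1
  · rw [show ((loc.length : Int) - 2) = -1 by rw [h1]; norm_num,
      PySem.List.pyRange_neg_one_eq_nil (by norm_num), List.foldl_nil]
    refine List.map_congr_left fun i hi => ?_
    have hi' := List.mem_range.mp hi
    rw [if_pos hi', pvFin_last loc i (by omega)]
  · have h2 : 2 ≤ loc.length := by omega
    have hinit : (List.range loc.length).map (fun i => if i < loc.length then pvUp loc i else 1)
        = (List.range loc.length).map
            (fun i => if i < (loc.length - 2) + 1 then pvUp loc i else pvFin loc i) := by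
      refine List.map_congr_left fun i hi => ?_
      have hi' := List.mem_range.mp hi
      by_cases hl : i < loc.length - 1
      · rw [if_pos hi', if_pos (by omega)]
      · rw [if_pos hi', if_neg (by omega), pvFin_last loc i (by omega)]
    rw [hinit, show ((loc.length : Int) - 2) = ((loc.length - 2 : Nat) : Int) by omega,
      bwd_inv loc (loc.length - 2) (by omega)]

-- ===== VERDICT (by name: the statement is the Claim_ definition above) =====
theorem calculate_bonuses_spec : Claim_equal_calculate_bonuses := by
  intro loc _
  unfold Spec_calculate_bonuses
  rw [a_eq, alt_eq]
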